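-- pv_equiv track=rewrite | github.com/zenlyj/aoc | 2023/day11/1.py | mark_nodes
-- ===== SOURCE A (Python) =====
-- def mark_nodes(grid):
--     idx = 0
--     nodes = []
--     for i in range(len(grid)):
--         for j in range(len(grid[0])):
--             if grid[i][j] == '#':
--                 grid[i][j] = str(idx)
--                 idx += 1
--                 nodes.append((i, j))
--     return nodes
-- ===== SOURCE B (Python) =====
-- def mark_nodes(grid):
--     rows = len(grid)
--     cols = len(grid[0]) if grid else 0
--     flat = [grid[i][j] for i in range(rows) for j in range(cols)]
--     nodes = []
--     start = 0
--     while True: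
--         try:
--             k = flat.index('#', start)
--         except ValueError:
--             break
--         i, j = divmod(k, cols)
--         grid[i][j] = str(len(nodes))
--         nodes.append((i, j))
--         start = k + 1
--     return nodes
-- ===== Notes on version B (the rewrite author's own statement) =====
-- stated objective: alternative
-- what changed: B flattens the grid into one row-major list, then repeatedly uses list.index('#', start) to jump to the next galaxy and decodes each flat index back to (row, col) with divmod, instead of A's nested row/column scan with an interleaved counter.
import Mathlib
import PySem

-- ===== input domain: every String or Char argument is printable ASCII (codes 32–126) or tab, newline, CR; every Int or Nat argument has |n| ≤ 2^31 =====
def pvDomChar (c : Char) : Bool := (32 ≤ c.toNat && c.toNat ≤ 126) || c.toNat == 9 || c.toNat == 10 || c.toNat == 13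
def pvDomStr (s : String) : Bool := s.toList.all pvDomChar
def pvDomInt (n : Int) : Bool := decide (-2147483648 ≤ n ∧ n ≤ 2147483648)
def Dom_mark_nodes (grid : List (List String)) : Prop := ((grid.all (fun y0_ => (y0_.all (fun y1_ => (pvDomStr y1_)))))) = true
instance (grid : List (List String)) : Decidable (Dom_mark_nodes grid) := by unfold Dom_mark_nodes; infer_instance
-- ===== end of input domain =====

-- B replaces A's nested row/column scan by flatten + repeated list.index('#', start) + divmod
-- decoding (objective: alternative); the equivalence proved here is about the RETURN value
-- (both programs perform the same in-place labeling mutation on inputs admitted by Pre_).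

-- ===== PORT A =====
-- A's interleaved scan: state = (idx, nodes, grid), row 0's length re-read each outer iteration
-- from the (possibly mutated) grid, exactly as Python's range(len(grid[0])).
def markStepInner (i : Nat) (st2 : Int × List (Int × Int) × List (List String)) (j : Nat) :
    Int × List (Int × Int) × List (List String) :=
  if (st2.2.2.getD i []).getD j "" = "#" then
    (st2.1 + 1, st2.2.1 ++ [((i : Int), (j : Int))],
      st2.2.2.set i ((st2.2.2.getD i []).set j (PySem.Int.toStr st2.1)))
  else st2

def markStepOuter (st : Int × List (Int × Int) × List (List String)) (i : Nat) :
    Int × List (Int × Int) × List (List String) :=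
  (List.range (st.2.2.headD []).length).foldl (markStepInner i) st

def mark_nodes (grid : List (List String)) : List (Int × Int) :=
  ((List.range grid.length).foldl markStepOuter (0, ([], grid))).2.1

-- ===== PORT B =====
-- flat = [grid[i][j] for i in range(rows) for j in range(cols)]
def mnFlat (grid : List (List String)) (rows cols : Nat) : List String :=
  (List.range rows).flatMap (fun i => (List.range cols).map (fun j => (grid.getD i []).getD j ""))

-- the while loop: flat.index('#', start) is ported as index? on flat[start:] (Python-equal),
-- divmod(k, cols) as PySem floordiv/mod; B's grid mutation does not affect the returned list,
-- so the port carries only (start, nodes).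
def mnSearch (cols : Nat) (flat : List String) (start : Nat) (nodes : List (Int × Int)) :
    List (Int × Int) :=
  match hfound : PySem.List.index? (flat.drop start) "#" with
  | none => nodes
  | some d =>
    mnSearch cols flat (start + d + 1)
      (nodes ++ [(PySem.Int.floordiv ((start + d : Nat) : Int) (cols : Int),
                  PySem.Int.mod ((start + d : Nat) : Int) (cols : Int))])
termination_by flat.length - start
decreasing_by
  obtain ⟨hk, -, -⟩ := PySem.List.getElem_of_index?_eq_some hfound
  simp only [List.length_drop] at hk
  omega

def mark_nodes_alt (grid : List (List String)) : List (Int × Int) :=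
  let rows := grid.length
  let cols := if grid.isEmpty then 0 else (grid.headD []).length
  mnSearch cols (mnFlat grid rows cols) 0 []

-- ===== PRECONDITION & SPEC =====
-- Pre_ excludes exactly the ragged grids on which Python's grid[i][j] (j ranging over row 0's
-- length) raises IndexError in both A and B.
def Pre_mark_nodes (grid : List (List String)) : Prop :=
  ∀ row ∈ grid, (grid.headD []).length ≤ row.length
instance (grid : List (List String)) : Decidable (Pre_mark_nodes grid) := by
  unfold Pre_mark_nodes; infer_instance

def pvWitness_mark_nodes : List (List String) := [["#", "."], [".", "#"]]

def Spec_mark_nodes (grid : List (List String)) (out : List (Int × Int)) : Prop := out = mark_nodes_alt grid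
instance (grid : List (List String)) (out : List (Int × Int)) : Decidable (Spec_mark_nodes grid out) := by unfold Spec_mark_nodes; infer_instance

-- ===== CLAIM (what is proved, stated in full; the proofs are below) =====
def Claim_equal_mark_nodes : Prop := ∀ (grid : List (List String)), Dom_mark_nodes grid → Pre_mark_nodes grid → Spec_mark_nodes grid (mark_nodes grid)

-- ===== LEMMAS AND PROOFS =====

-- the common normal form both ports are reduced to
def mnCanon (grid : List (List String)) (rows cols : Nat) : List (Int × Int) :=
  (List.range rows).flatMap (fun i =>
    (List.range cols).filterMap (fun j =>
      if (grid.getD i []).getD j "" = "#" then some ((i : Int), (j : Int)) else none))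

lemma headD_eq_getD (l : List (List String)) : l.headD [] = l.getD 0 [] := by
  cases l <;> rfl

lemma getD_set_ne (g : List (List String)) (i i' : Nat) (r : List String) (h : i ≠ i') :
    (g.set i r).getD i' [] = g.getD i' [] := by
  simp [List.getD, List.getElem?_set_ne h]

lemma getD_str_set_ne (row : List String) (j j' : Nat) (s : String) (h : j ≠ j') :
    (row.set j s).getD j' "" = row.getD j' "" := by
  simp [List.getD, List.getElem?_set_ne h]

-- A-side inner loop: on columns `js` (no duplicates) of row `i`, provided the current grid `g`
-- still agrees with the original `grid` on those cells, nodes grows by the filterMap of the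
-- original grid's cells; other rows are untouched and row i keeps its length.
lemma inner_spec (grid : List (List String)) (i : Nat) (js : List Nat) (hnd : js.Nodup)
    (idx : Int) (nodes : List (Int × Int)) (g : List (List String))
    (hcols : ∀ j ∈ js, (g.getD i []).getD j "" = (grid.getD i []).getD j "") :
    (js.foldl (markStepInner i) (idx, (nodes, g))).2.1
      = nodes ++ js.filterMap (fun j => if (grid.getD i []).getD j "" = "#" then some ((i : Int), (j : Int)) else none)
    ∧ (∀ i', i' ≠ i → (js.foldl (markStepInner i) (idx, (nodes, g))).2.2.getD i' [] = g.getD i' [])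
    ∧ ((js.foldl (markStepInner i) (idx, (nodes, g))).2.2.getD i []).length = (g.getD i []).length := by
  induction js generalizing idx nodes g with
  | nil => simp
  | cons j rest ih =>
    have hj := hcols j (by simp)
    have hnd' : rest.Nodup := (List.nodup_cons.mp hnd).2
    have hjrest : j ∉ rest := (List.nodup_cons.mp hnd).1
    by_cases hc : (g.getD i []).getD j "" = "#"
    · have hstep : markStepInner i (idx, (nodes, g)) j
          = (idx + 1, (nodes ++ [((i : Int), (j : Int))],
              g.set i ((g.getD i []).set j (PySem.Int.toStr idx)))) := by
        simp only [markStepInner]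
        rw [if_pos hc]
      set r : List String := (g.getD i []).set j (PySem.Int.toStr idx) with hr
      set g' : List (List String) := g.set i r with hg'
      have hrowi : g'.getD i [] = if i < g.length then r else g.getD i [] := by
        by_cases hi : i < g.length
        · simp [hg', hi]
        · have : g.set i r = g := List.set_eq_of_length_le (by omega)
          simp [hg', this, hi]
      have hrow_cells : ∀ j' ∈ rest, (g'.getD i []).getD j' "" = (g.getD i []).getD j' "" := by
        intro j' hj'
        have hne : j ≠ j' := fun h => hjrest (h ▸ hj')
        rw [hrowi]
        by_cases hi : i < g.length
        · simp only [if_pos hi, hr]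
          exact getD_str_set_ne _ j j' _ hne
        · simp [hi]
      have hcols' : ∀ j' ∈ rest, (g'.getD i []).getD j' "" = (grid.getD i []).getD j' "" := by
        intro j' hj'; rw [hrow_cells j' hj']; exact hcols j' (by simp [hj'])
      obtain ⟨h1, h2, h3⟩ := ih hnd' (idx + 1) (nodes ++ [((i : Int), (j : Int))]) g' hcols'
      refine ⟨?_, ?_, ?_⟩
      · rw [List.foldl_cons, hstep, h1]
        rw [hj] at hc
        have hfm := List.filterMap_cons_some
          (f := fun x => if (grid.getD i []).getD x "" = "#" then some ((i : Int), (x : Int)) else none)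
          (a := j) (l := rest) (b := ((i : Int), (j : Int))) (if_pos hc)
        rw [hfm]
        simp
      · intro i' hi'
        rw [List.foldl_cons, hstep, h2 i' hi', hg', getD_set_ne g i i' r (fun h => hi' h.symm)]
      · rw [List.foldl_cons, hstep, h3, hrowi]
        by_cases hi : i < g.length
        · simp [hi, hr]
        · simp [hi]
    · have hstep : markStepInner i (idx, (nodes, g)) j = (idx, (nodes, g)) := by
        simp only [markStepInner]
        rw [if_neg hc]
      obtain ⟨h1, h2, h3⟩ := ih hnd' idx nodes g (fun j' hj' => hcols j' (by simp [hj']))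
      have hc' : ¬ (grid.getD i []).getD j "" = "#" := by rw [← hj]; exact hc
      refine ⟨?_, ?_, ?_⟩
      · rw [List.foldl_cons, hstep, h1]
        have hfm := List.filterMap_cons_none
          (f := fun x => if (grid.getD i []).getD x "" = "#" then some ((i : Int), (x : Int)) else none)
          (a := j) (l := rest) (if_neg hc')
        rw [hfm]
      · intro i' hi'; rw [List.foldl_cons, hstep]; exact h2 i' hi'
      · rw [List.foldl_cons, hstep]; exact h3

-- A-side outer loop over rows `is` (no duplicates)
lemma outer_spec (grid : List (List String)) (is : List Nat) (hnd : is.Nodup)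
    (idx : Int) (nodes : List (Int × Int)) (g : List (List String))
    (hrows : ∀ i ∈ is, g.getD i [] = grid.getD i [])
    (hlen0 : (g.getD 0 []).length = (grid.getD 0 []).length) :
    (is.foldl markStepOuter (idx, (nodes, g))).2.1
      = nodes ++ is.flatMap (fun i => (List.range (grid.getD 0 []).length).filterMap
          (fun j => if (grid.getD i []).getD j "" = "#" then some ((i : Int), (j : Int)) else none)) := by
  induction is generalizing idx nodes g with
  | nil => simp
  | cons i rest ih =>
    have hnd' : rest.Nodup := (List.nodup_cons.mp hnd).2
    have hirest : i ∉ rest := (List.nodup_cons.mp hnd).1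
    have hrowi : g.getD i [] = grid.getD i [] := hrows i (by simp)
    have hstep : markStepOuter (idx, (nodes, g)) i
        = (List.range (grid.getD 0 []).length).foldl (markStepInner i) (idx, (nodes, g)) := by
      simp only [markStepOuter, headD_eq_getD]
      rw [hlen0]
    obtain ⟨h1, h2, h3⟩ := inner_spec grid i (List.range (grid.getD 0 []).length)
      (List.nodup_range) idx nodes g (fun j _ => by rw [hrowi])
    set st' := (List.range (grid.getD 0 []).length).foldl (markStepInner i) (idx, (nodes, g)) with hst'
    have hrows' : ∀ i' ∈ rest, st'.2.2.getD i' [] = grid.getD i' [] := by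
      intro i' hi'
      have hne : i' ≠ i := fun h => hirest (h ▸ hi')
      rw [h2 i' hne]; exact hrows i' (by simp [hi'])
    have hlen0' : (st'.2.2.getD 0 []).length = (grid.getD 0 []).length := by
      by_cases h0 : i = 0
      · rw [← h0] at hlen0 ⊢; rw [h3, hlen0, h0]
      · rw [h2 0 (fun h => h0 h.symm)]; exact hlen0
    have := ih hnd' st'.1 st'.2.1 st'.2.2 hrows' hlen0'
    rw [List.foldl_cons, hstep, ← hst'] at *
    calc (rest.foldl markStepOuter st').2.1
        = (rest.foldl markStepOuter (st'.1, (st'.2.1, st'.2.2))).2.1 := rfl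
      _ = st'.2.1 ++ _ := this
      _ = _ := by rw [h1]; simp [List.append_assoc]

-- A's port equals the normal form
lemma markA_eq_canon (grid : List (List String)) :
    mark_nodes grid = mnCanon grid grid.length (grid.getD 0 []).length := by
  unfold mark_nodes mnCanon
  rw [outer_spec grid (List.range grid.length) List.nodup_range 0 [] grid
      (fun _ _ => rfl) rfl, List.nil_append]

-- B-side: mnSearch collects, in order, the '#' positions of flat at indices ≥ start,
-- decoded through floordiv/mod.
lemma mnSearch_spec (cols : Nat) (flat : List String) :
    ∀ (start : Nat) (nodes : List (Int × Int)),
    mnSearch cols flat start nodes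
      = nodes ++ (List.range' start (flat.length - start)).filterMap (fun k =>
          if flat.getD k "" = "#" then
            some (PySem.Int.floordiv (k : Int) (cols : Int), PySem.Int.mod (k : Int) (cols : Int))
          else none) := by
  intro start
  induction hn : flat.length - start using Nat.strong_induction_on generalizing start with
  | _ n ih =>
    intro nodes
    subst hn
    rw [mnSearch]
    split
    next h =>
      have hnot : "#" ∉ flat.drop start := (PySem.List.index?_eq_none_iff _ _).mp h
      rw [List.filterMap_eq_nil_iff.mpr, List.append_nil]
      intro k hk
      have hk' := List.mem_range'_1.mp hk
      have hkL : k < flat.length := by omega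
      have hsd : k - start < (flat.drop start).length := by simp [List.length_drop]; omega
      have hdg : (flat.drop start)[k - start] = flat[k] := by
        rw [List.getElem_drop]; congr 1; omega
      have hmem : flat[k] ∈ flat.drop start := hdg ▸ List.getElem_mem hsd
      rw [List.getD_eq_getElem flat "" hkL]
      exact if_neg (fun he => hnot (by rw [← he]; exact hmem))
    next d h =>
      obtain ⟨hd, heq, hlt⟩ := PySem.List.getElem_of_index?_eq_some h
      have hdL : d < flat.length - start := by simpa [List.length_drop] using hd
      have hkL : start + d < flat.length := by omega
      have hhit : flat.getD (start + d) "" = "#" := by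
        rw [List.getD_eq_getElem flat "" hkL]
        rw [List.getElem_drop] at heq
        exact heq
      have hrec := ih (flat.length - (start + d + 1)) (by omega) (start + d + 1) rfl
        (nodes ++ [(PySem.Int.floordiv ((start + d : Nat) : Int) (cols : Int),
                    PySem.Int.mod ((start + d : Nat) : Int) (cols : Int))])
      rw [hrec]
      -- split range' start (L-start) = range' start d ++ (start+d) :: range' (start+d+1) …
      have hsplit : List.range' start (flat.length - start)
          = List.range' start d ++ (start + d) :: List.range' (start + d + 1) (flat.length - (start + d + 1)) := by
        have h1 : List.range' start d ++ List.range' (start + d) (flat.length - start - d)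
            = List.range' start (flat.length - start) := by
          rw [List.range'_append_1]; congr 1; omega
        have h2 : List.range' (start + d) (flat.length - start - d)
            = (start + d) :: List.range' (start + d + 1) (flat.length - (start + d + 1)) := by
          have : flat.length - start - d = (flat.length - (start + d + 1)) + 1 := by omega
          rw [this, List.range'_succ]
        rw [← h1, h2]
      rw [hsplit, List.filterMap_append, List.filterMap_cons, hhit, if_pos rfl]
      have hpre : (List.range' start d).filterMap (fun k =>
          if flat.getD k "" = "#" then
            some (PySem.Int.floordiv (k : Int) (cols : Int), PySem.Int.mod (k : Int) (cols : Int))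
          else none) = [] := by
        rw [List.filterMap_eq_nil_iff]
        intro k hk
        have hk' := List.mem_range'_1.mp hk
        have hkL' : k < flat.length := by omega
        have hne : flat[k] ≠ "#" := by
          have hh : (flat.drop start)[k - start]'(by simp [List.length_drop]; omega) = flat[k] := by
            rw [List.getElem_drop]; congr 1; omega
          rw [← hh]; exact hlt (k - start) (by omega)
        rw [List.getD_eq_getElem flat "" hkL']
        exact if_neg hne
      rw [hpre]
      simp [List.append_assoc]

-- blocks of equal length C: length and indexing of the flattened list
lemma flatten_length (C : Nat) (blocks : List (List String))
    (hlen : ∀ b ∈ blocks, b.length = C) :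
    blocks.flatten.length = blocks.length * C := by
  induction blocks with
  | nil => simp
  | cons b bs ih =>
    simp only [List.flatten_cons, List.length_append, List.length_cons]
    rw [hlen b (by simp), ih (fun b' hb' => hlen b' (by simp [hb']))]
    ring

lemma flatten_getD (C : Nat) (blocks : List (List String))
    (hlen : ∀ b ∈ blocks, b.length = C) :
    ∀ i j, i < blocks.length → j < C →
      blocks.flatten.getD (i * C + j) "" = (blocks.getD i []).getD j "" := by
  induction blocks with
  | nil => intro i j hi _; exact absurd hi (by simp)
  | cons b bs ih =>
    intro i j hi hj
    have hb : b.length = C := hlen b (by simp)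
    have hlen' : ∀ b' ∈ bs, b'.length = C := fun b' hb' => hlen b' (by simp [hb'])
    cases i with
    | zero =>
      simp only [List.flatten_cons, Nat.zero_mul, Nat.zero_add]
      rw [List.getD_append _ _ _ _ (by omega)]
      rfl
    | succ i' =>
      have hbs : bs.flatten.length = bs.length * C := flatten_length C bs hlen'
      have hrec := ih hlen' i' j (by simpa using hi) hj
      have harith : (i' + 1) * C + j = b.length + (i' * C + j) := by rw [hb]; ring
      simp only [List.flatten_cons, harith]
      by_cases hin : i' * C + j < bs.flatten.length
      · rw [List.getD_eq_getElem _ "" (by simp only [List.length_append]; omega),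
            List.getElem_append_right (by omega)]
        have hx : b.length + (i' * C + j) - b.length = i' * C + j := by omega
        simp only [hx]
        rw [← List.getD_eq_getElem bs.flatten "" hin, hrec]
        rfl
      · rw [List.getD_eq_default _ "" (by simp only [List.length_append]; omega)]
        rw [List.getD_eq_default _ "" (by omega)] at hrec
        exact hrec

-- divmod decoding of a row-major index
lemma decode_divmod (i j C : Nat) (hj : j < C) :
    PySem.Int.floordiv ((i * C + j : Nat) : Int) (C : Int) = (i : Int)
    ∧ PySem.Int.mod ((i * C + j : Nat) : Int) (C : Int) = (j : Int) := by
  constructor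
  · rw [PySem.Int.floordiv_natCast]
    congr 1
    rw [Nat.add_comm, Nat.add_mul_div_right _ _ (by omega : 0 < C), Nat.div_eq_of_lt hj]
    omega
  · rw [PySem.Int.mod_natCast]
    congr 1
    rw [Nat.add_comm, Nat.add_mul_mod_self_right, Nat.mod_eq_of_lt hj]

-- mnFlat facts
lemma mnFlat_length (grid : List (List String)) (R C : Nat) :
    (mnFlat grid R C).length = R * C := by
  simp [mnFlat]

lemma mnFlat_succ (grid : List (List String)) (R C : Nat) :
    mnFlat grid (R + 1) C
      = mnFlat grid R C ++ (List.range C).map (fun j => (grid.getD R []).getD j "") := by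
  simp [mnFlat, List.range_succ]

lemma mnFlat_getD (grid : List (List String)) (R C : Nat) (i j : Nat) (hi : i < R) (hj : j < C) :
    (mnFlat grid R C).getD (i * C + j) "" = (grid.getD i []).getD j "" := by
  have hlen : ∀ b ∈ (List.range R).map (fun i => (List.range C).map (fun j => (grid.getD i []).getD j "")), b.length = C := by
    intro b hb
    simp only [List.mem_map] at hb
    obtain ⟨i', -, rfl⟩ := hb
    simp
  have hflat : mnFlat grid R C
      = ((List.range R).map (fun i => (List.range C).map (fun j => (grid.getD i []).getD j ""))).flatten := by
    simp [mnFlat, List.flatMap_def]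
  rw [hflat, flatten_getD C _ hlen i j (by simpa using hi) hj]
  rw [List.getD_eq_getElem _ [] (by simpa using hi)]
  simp [hj]

-- the filterMap over range (R*C) regroups into the canonical flatMap
lemma blockify (grid : List (List String)) (C : Nat) (R : Nat) :
    (List.range (R * C)).filterMap (fun k =>
        if (mnFlat grid R C).getD k "" = "#" then
          some (PySem.Int.floordiv (k : Int) (C : Int), PySem.Int.mod (k : Int) (C : Int))
        else none)
      = mnCanon grid R C := by
  induction R with
  | zero => simp [mnCanon]
  | succ R' ihR =>
    have hR : (R' + 1) * C = R' * C + C := by ring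
    rw [hR, List.range_add, List.filterMap_append, List.filterMap_map]
    have hpref : ∀ k ∈ List.range (R' * C),
        (mnFlat grid (R' + 1) C).getD k "" = (mnFlat grid R' C).getD k "" := by
      intro k hk
      have hk' : k < R' * C := List.mem_range.mp hk
      rw [mnFlat_succ, List.getD_append _ _ _ _ (by rw [mnFlat_length]; omega)]
    have h1 : (List.range (R' * C)).filterMap (fun k =>
        if (mnFlat grid (R' + 1) C).getD k "" = "#" then
          some (PySem.Int.floordiv (k : Int) (C : Int), PySem.Int.mod (k : Int) (C : Int))
        else none) = mnCanon grid R' C := by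
      rw [← ihR]
      apply List.filterMap_congr
      intro k hk
      rw [hpref k hk]
    have h2 : (List.range C).filterMap ((fun k =>
        if (mnFlat grid (R' + 1) C).getD k "" = "#" then
          some (PySem.Int.floordiv (k : Int) (C : Int), PySem.Int.mod (k : Int) (C : Int))
        else none) ∘ (fun j => R' * C + j))
        = (List.range C).filterMap (fun j =>
            if (grid.getD R' []).getD j "" = "#" then some ((R' : Int), (j : Int)) else none) := by
      apply List.filterMap_congr
      intro j hj
      have hj' : j < C := List.mem_range.mp hj
      obtain ⟨hdiv, hmod⟩ := decode_divmod R' j C hj'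
      simp only [Function.comp_apply]
      rw [mnFlat_getD grid (R' + 1) C R' j (by omega) hj', hdiv, hmod]
    rw [h1, h2]
    unfold mnCanon
    rw [List.range_succ, List.flatMap_append]
    simp

-- B's port equals the normal form
lemma markB_eq_canon (grid : List (List String)) :
    mark_nodes_alt grid = mnCanon grid grid.length (grid.getD 0 []).length := by
  unfold mark_nodes_alt
  cases grid with
  | nil =>
    rw [mnSearch_spec]
    simp [mnCanon, mnFlat]
  | cons row rest =>
    simp only [List.isEmpty_cons, if_neg Bool.false_ne_true, headD_eq_getD]
    by_cases hC : ((row :: rest).getD 0 []).length = 0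
    · rw [hC, mnSearch_spec]
      simp [mnCanon, mnFlat]
    · rw [mnSearch_spec, List.nil_append, Nat.sub_zero, mnFlat_length,
        ← List.range_eq_range', blockify _ _ _]

-- ===== VERDICT (by name: the statement is the Claim_ definition above) =====
theorem mark_nodes_spec : Claim_equal_mark_nodes := by
  intro grid _ _
  unfold Spec_mark_nodes
  rw [markA_eq_canon, markB_eq_canon]
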